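-- pv_equiv track=rewrite | github.com/networkdynamics/influencemapper | src/postprocess_iarc.py | infer_is_company
-- ===== SOURCE A (Python) =====
-- def infer_is_company(name):
--     name = name.strip()
--     keywords = ['university', 'college', 'school', 'program', 'hospital', 'department',
--                 'agency', 'bureau', 'registry', 'federal', 'government', 'ministry', 'municipal', 'state', 'national']
--     keywords += ['universidad', 'colegio', 'escuela', 'programa', 'hospital', 'departamento',
--  'agencia', 'oficina', 'registro', 'federal', 'gobierno', 'ministerio', 'municipal', 'estado', 'nacional']
--     keywords += ['université', 'collège', 'école', 'programme', 'hôpital', 'département',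
--     'agence', 'bureau', 'registre', 'fédéral', 'gouvernement', 'ministère', 'municipal', 'état', 'national']
--     keywords += ['universität', 'college', 'schule', 'programm', 'krankenhaus', 'abteilung',
--     'agentur', 'büro', 'register', 'bundes', 'regierung', 'ministerium', 'kommunal', 'staat', 'national']
--     keywords += ['università', 'college', 'scuola', 'programma', 'ospedale', 'dipartimento',
--     'agenzia', 'ufficio', 'registro', 'federale', 'governo', 'ministero', 'comunale', 'stato', 'nazionale']
--     keywords += ['universiteit', 'college', 'school', 'programma', 'ziekenhuis', 'afdeling',
--     'agentschap', 'bureau', 'register', 'federaal', 'overheid', 'ministerie', 'gemeentelijk', 'staat', 'nationaal']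
--     abbr_name = ['NIH', 'NCI', 'NTP', 'NIEHS', 'NIOSH', 'EPA', 'CDC']
--     long_name = ['National Institutes of Health', 'National Cancer Institute', 'National Toxicology Program',
--                  'National Institute of Environmental Health Sciences',
--                  'National Institute for Occupational Safety and Health', 'Environmental Protection Agency',
--                  'Centers for Disease Control and Prevention']
--     for keyword in keywords:
--         if keyword.upper() in name.upper():
--             return 'Unlikely'
--         for abbr in abbr_name:
--             if abbr.upper() == name.upper():
--                 return 'Unlikely'
--             if '(' + abbr.upper() + ')' in name.upper() or (' ' + abbr.upper() in name.upper() or abbr.upper() + ' ' in name.upper()):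
--                 return 'Unlikely'
--         for long in long_name:
--             if long.upper() in name.upper():
--                 return 'Unlikely'
--     keywords = ['council', 'academy', 'fund', 'foundation', 'health', 'society', 'union', 'division']
--     for keyword in keywords:
--         if keyword.upper() in name.upper():
--             return 'Possibly'
--     if name == 'N/A':
--         return 'N/A'
--     return 'Likely'
-- ===== SOURCE B (Python) =====
-- def infer_is_company(name):
--     name = name.strip()
--     u = name.upper()
--     keywords = ['university', 'college', 'school', 'program', 'hospital', 'department',
--                 'agency', 'bureau', 'registry', 'federal', 'government', 'ministry', 'municipal', 'state', 'national']
--     keywords += ['universidad', 'colegio', 'escuela', 'programa', 'hospital', 'departamento',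
--  'agencia', 'oficina', 'registro', 'federal', 'gobierno', 'ministerio', 'municipal', 'estado', 'nacional']
--     keywords += ['université', 'collège', 'école', 'programme', 'hôpital', 'département',
--     'agence', 'bureau', 'registre', 'fédéral', 'gouvernement', 'ministère', 'municipal', 'état', 'national']
--     keywords += ['universität', 'college', 'schule', 'programm', 'krankenhaus', 'abteilung',
--     'agentur', 'büro', 'register', 'bundes', 'regierung', 'ministerium', 'kommunal', 'staat', 'national']
--     keywords += ['università', 'college', 'scuola', 'programma', 'ospedale', 'dipartimento',
--     'agenzia', 'ufficio', 'registro', 'federale', 'governo', 'ministero', 'comunale', 'stato', 'nazionale']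
--     keywords += ['universiteit', 'college', 'school', 'programma', 'ziekenhuis', 'afdeling',
--     'agentschap', 'bureau', 'register', 'federaal', 'overheid', 'ministerie', 'gemeentelijk', 'staat', 'nationaal']
--     abbr_name = ['NIH', 'NCI', 'NTP', 'NIEHS', 'NIOSH', 'EPA', 'CDC']
--     long_name = ['National Institutes of Health', 'National Cancer Institute', 'National Toxicology Program',
--                  'National Institute of Environmental Health Sciences',
--                  'National Institute for Occupational Safety and Health', 'Environmental Protection Agency',
--                  'Centers for Disease Control and Prevention']
--     if any(k.upper() in u for k in keywords) \
--        or any(a == u or '(' + a + ')' in u or ' ' + a in u or a + ' ' in u for a in abbr_name) \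
--        or any(l.upper() in u for l in long_name):
--         return 'Unlikely'
--     if any(k in u for k in ['COUNCIL', 'ACADEMY', 'FUND', 'FOUNDATION', 'HEALTH', 'SOCIETY', 'UNION', 'DIVISION']):
--         return 'Possibly'
--     if name == 'N/A':
--         return 'N/A'
--     return 'Likely'
-- ===== Notes on version B (the rewrite author's own statement) =====
-- stated objective: faster
-- what changed: A rescans the constant abbr/long lists inside every iteration of the 36-keyword loop and recomputes name.upper() in every test; B hoists the uppercased name and replaces the nesting by three flat sequential any() passes (keywords, abbr forms, long names), then the Possibly pass over pre-uppercased literals.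
import Mathlib
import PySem

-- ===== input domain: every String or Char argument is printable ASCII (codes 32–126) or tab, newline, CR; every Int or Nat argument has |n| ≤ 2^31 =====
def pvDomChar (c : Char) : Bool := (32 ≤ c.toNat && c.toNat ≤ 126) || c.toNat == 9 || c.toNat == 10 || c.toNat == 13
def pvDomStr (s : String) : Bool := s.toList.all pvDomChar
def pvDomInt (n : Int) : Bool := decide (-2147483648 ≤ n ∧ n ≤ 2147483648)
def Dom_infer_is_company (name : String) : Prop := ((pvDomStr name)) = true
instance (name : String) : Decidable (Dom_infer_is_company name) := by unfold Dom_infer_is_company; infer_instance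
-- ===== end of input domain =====

-- B replaces A's nesting of the constant abbr/long scans inside the 36-keyword loop by three flat
-- one-pass any-scans (and hoists name.upper()), a constant-factor speedup; return value unchanged.

-- ===== PORT A =====
def pvKeywords : List String :=
  ["university", "college", "school", "program", "hospital", "department",
   "agency", "bureau", "registry", "federal", "government", "ministry", "municipal", "state", "national",
   "universidad", "colegio", "escuela", "programa", "hospital", "departamento",
   "agencia", "oficina", "registro", "federal", "gobierno", "ministerio", "municipal", "estado", "nacional",
   "université", "collège", "école", "programme", "hôpital", "département",
   "agence", "bureau", "registre", "fédéral", "gouvernement", "ministère", "municipal", "état", "national",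
   "universität", "college", "schule", "programm", "krankenhaus", "abteilung",
   "agentur", "büro", "register", "bundes", "regierung", "ministerium", "kommunal", "staat", "national",
   "università", "college", "scuola", "programma", "ospedale", "dipartimento",
   "agenzia", "ufficio", "registro", "federale", "governo", "ministero", "comunale", "stato", "nazionale",
   "universiteit", "college", "school", "programma", "ziekenhuis", "afdeling",
   "agentschap", "bureau", "register", "federaal", "overheid", "ministerie", "gemeentelijk", "staat", "nationaal"]

def pvAbbrNames : List String := ["NIH", "NCI", "NTP", "NIEHS", "NIOSH", "EPA", "CDC"]

def pvLongNames : List String :=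
  ["National Institutes of Health", "National Cancer Institute", "National Toxicology Program",
   "National Institute of Environmental Health Sciences",
   "National Institute for Occupational Safety and Health", "Environmental Protection Agency",
   "Centers for Disease Control and Prevention"]

-- A's inner 'for abbr in abbr_name' loop (True = some branch returned 'Unlikely')
def pvAbbrLoop (nU : String) : List String → Bool
  | [] => false
  | a :: rest =>
    if PySem.Str.upper a == nU then true
    else if PySem.Str.isIn ("(" ++ PySem.Str.upper a ++ ")") nU
            || (PySem.Str.isIn (" " ++ PySem.Str.upper a) nU
                || PySem.Str.isIn (PySem.Str.upper a ++ " ") nU) then true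
    else pvAbbrLoop nU rest

-- A's inner 'for long in long_name' loop
def pvLongLoop (nU : String) : List String → Bool
  | [] => false
  | l :: rest =>
    if PySem.Str.isIn (PySem.Str.upper l) nU then true else pvLongLoop nU rest

-- A's outer 'for keyword in keywords' loop, rescanning abbr_name and long_name each iteration
def pvUnlikelyLoop (nU : String) : List String → Bool
  | [] => false
  | k :: rest =>
    if PySem.Str.isIn (PySem.Str.upper k) nU then true
    else if pvAbbrLoop nU pvAbbrNames then true
    else if pvLongLoop nU pvLongNames then true
    else pvUnlikelyLoop nU rest

-- A's second 'for keyword in keywords' ('Possibly') loop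
def pvPossiblyLoop (nU : String) : List String → Bool
  | [] => false
  | k :: rest =>
    if PySem.Str.isIn (PySem.Str.upper k) nU then true else pvPossiblyLoop nU rest

def infer_is_company (name : String) : String :=
  let n := PySem.Str.strip name
  if pvUnlikelyLoop (PySem.Str.upper n) pvKeywords then "Unlikely"
  else if pvPossiblyLoop (PySem.Str.upper n)
           ["council", "academy", "fund", "foundation", "health", "society", "union", "division"] then "Possibly"
  else if n == "N/A" then "N/A"
  else "Likely"

-- ===== PORT B =====
def infer_is_company_alt (name : String) : String :=
  let n := PySem.Str.strip name
  let u := PySem.Str.upper n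
  if pvKeywords.any (fun k => PySem.Str.isIn (PySem.Str.upper k) u)
     || pvAbbrNames.any (fun a =>
          a == u || (PySem.Str.isIn ("(" ++ a ++ ")") u
                     || (PySem.Str.isIn (" " ++ a) u || PySem.Str.isIn (a ++ " ") u)))
     || pvLongNames.any (fun l => PySem.Str.isIn (PySem.Str.upper l) u) then "Unlikely"
  else if ["COUNCIL", "ACADEMY", "FUND", "FOUNDATION", "HEALTH", "SOCIETY", "UNION", "DIVISION"].any
            (fun k => PySem.Str.isIn k u) then "Possibly"
  else if n == "N/A" then "N/A"
  else "Likely"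

-- ===== PRECONDITION & SPEC =====
def Spec_infer_is_company (name : String) (out : String) : Prop := out = infer_is_company_alt name
instance (name : String) (out : String) : Decidable (Spec_infer_is_company name out) := by unfold Spec_infer_is_company; infer_instance

-- ===== CLAIM (what is proved, stated in full; the proofs are below) =====
def Claim_equal_infer_is_company : Prop := ∀ (name : String), Dom_infer_is_company name → Spec_infer_is_company name (infer_is_company name)

-- ===== LEMMAS AND PROOFS =====

theorem pvAbbrLoop_eq_any (u : String) (l : List String) :
    pvAbbrLoop u l
      = l.any (fun a =>
          PySem.Str.upper a == u
          || (PySem.Str.isIn ("(" ++ PySem.Str.upper a ++ ")") u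
              || (PySem.Str.isIn (" " ++ PySem.Str.upper a) u
                  || PySem.Str.isIn (PySem.Str.upper a ++ " ") u))) := by
  induction l with
  | nil => rfl
  | cons a rest ih =>
    simp only [pvAbbrLoop, List.any_cons, ih]
    split_ifs with h1 h2 <;> simp_all

theorem pvLongLoop_eq_any (u : String) (l : List String) :
    pvLongLoop u l = l.any (fun s => PySem.Str.isIn (PySem.Str.upper s) u) := by
  induction l with
  | nil => rfl
  | cons a rest ih =>
    simp only [pvLongLoop, List.any_cons, ih]
    split_ifs with h <;> simp_all

theorem pvPossiblyLoop_eq_any (u : String) (l : List String) :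
    pvPossiblyLoop u l = l.any (fun s => PySem.Str.isIn (PySem.Str.upper s) u) := by
  induction l with
  | nil => rfl
  | cons a rest ih =>
    simp only [pvPossiblyLoop, List.any_cons, ih]
    split_ifs with h <;> simp_all

-- when the constant inner scans find nothing, the outer loop is just a scan of the keywords
theorem pvUnlikelyLoop_of_false (u : String) (l : List String)
    (hab : pvAbbrLoop u pvAbbrNames = false) (hlg : pvLongLoop u pvLongNames = false) :
    pvUnlikelyLoop u l = l.any (fun k => PySem.Str.isIn (PySem.Str.upper k) u) := by
  induction l with
  | nil => rfl
  | cons k rest ih =>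
    simp only [pvUnlikelyLoop, List.any_cons, ih, hab, hlg]
    split_ifs with h <;> simp_all

theorem pvUnlikelyLoop_cons (u : String) (k : String) (rest : List String) :
    pvUnlikelyLoop u (k :: rest)
      = ((k :: rest).any (fun s => PySem.Str.isIn (PySem.Str.upper s) u)
         || pvAbbrLoop u pvAbbrNames || pvLongLoop u pvLongNames) := by
  cases hab : pvAbbrLoop u pvAbbrNames with
  | true =>
    simp only [pvUnlikelyLoop, hab]
    split_ifs with h <;> simp_all
  | false =>
    cases hlg : pvLongLoop u pvLongNames with
    | true =>
      simp only [pvUnlikelyLoop, hab, hlg]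
      split_ifs with h <;> simp_all
    | false =>
      rw [pvUnlikelyLoop_of_false u _ hab hlg]
      simp

theorem pvAbbr_any_eq (u : String) :
    pvAbbrNames.any (fun a =>
        PySem.Str.upper a == u
        || (PySem.Str.isIn ("(" ++ PySem.Str.upper a ++ ")") u
            || (PySem.Str.isIn (" " ++ PySem.Str.upper a) u
                || PySem.Str.isIn (PySem.Str.upper a ++ " ") u)))
      = pvAbbrNames.any (fun a =>
          a == u || (PySem.Str.isIn ("(" ++ a ++ ")") u
                     || (PySem.Str.isIn (" " ++ a) u || PySem.Str.isIn (a ++ " ") u))) := rfl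

theorem pvPoss_any_eq (u : String) :
    (["council", "academy", "fund", "foundation", "health", "society", "union", "division"] : List String).any
        (fun s => PySem.Str.isIn (PySem.Str.upper s) u)
      = (["COUNCIL", "ACADEMY", "FUND", "FOUNDATION", "HEALTH", "SOCIETY", "UNION", "DIVISION"] : List String).any
          (fun k => PySem.Str.isIn k u) := rfl

theorem pvCondA_eq (u : String) :
    pvUnlikelyLoop u pvKeywords
      = (pvKeywords.any (fun k => PySem.Str.isIn (PySem.Str.upper k) u)
         || (pvAbbrNames.any (fun a =>
              a == u || (PySem.Str.isIn ("(" ++ a ++ ")") u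
                         || (PySem.Str.isIn (" " ++ a) u || PySem.Str.isIn (a ++ " ") u)))
             || pvLongNames.any (fun l => PySem.Str.isIn (PySem.Str.upper l) u))) := by
  rw [show pvKeywords = "university" :: pvKeywords.tail from rfl, pvUnlikelyLoop_cons,
      pvAbbrLoop_eq_any, pvLongLoop_eq_any, pvAbbr_any_eq]
  simp [Bool.or_assoc]

theorem pv_main (name : String) : infer_is_company name = infer_is_company_alt name := by
  unfold infer_is_company infer_is_company_alt
  simp only [pvCondA_eq, pvPossiblyLoop_eq_any, pvPoss_any_eq, Bool.or_assoc]

-- ===== VERDICT (by name: the statement is the Claim_ definition above) =====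
theorem infer_is_company_spec : Claim_equal_infer_is_company := by
  intro name _
  exact pv_main name
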